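-- pv_equiv track=rewrite | github.com/nicorein7/PreworkPython-NicoRein | bucles_funciones.py | suma_cuadrados_pares_menores_igual
-- ===== SOURCE A (Python) =====
-- def suma_cuadrados_pares_menores_igual(n):
--     numero = n
--     suma = 0
--     while n > 1:
--         if n % 2 == 0:
--             suma += n ** 2
--             n = n-1
--         else:
--             n = n -1
--     return suma
-- ===== SOURCE B (Python) =====
-- def suma_cuadrados_pares_menores_igual(n):
--     m = n // 2 if n >= 2 else 0
--     return 2 * m * (m + 1) * (2 * m + 1) // 3
-- ===== Notes on version B (the rewrite author's own statement) =====
-- stated objective: faster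
-- what changed: Replaced the O(n) decrement loop over all integers down to 1 with the closed-form formula sum_{k=1..m}(2k)^2 = 2*m*(m+1)*(2*m+1)/3 with m = n//2.
import Mathlib
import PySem

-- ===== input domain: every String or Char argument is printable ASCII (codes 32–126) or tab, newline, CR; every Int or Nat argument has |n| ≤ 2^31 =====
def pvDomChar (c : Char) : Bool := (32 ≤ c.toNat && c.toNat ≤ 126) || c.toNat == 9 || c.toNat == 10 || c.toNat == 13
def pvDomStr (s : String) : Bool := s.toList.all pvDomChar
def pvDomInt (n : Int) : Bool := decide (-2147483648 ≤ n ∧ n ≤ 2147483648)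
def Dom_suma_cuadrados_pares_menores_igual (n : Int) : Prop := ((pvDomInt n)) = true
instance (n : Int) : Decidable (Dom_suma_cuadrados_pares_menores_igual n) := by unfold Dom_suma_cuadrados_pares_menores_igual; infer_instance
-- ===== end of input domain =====

-- B replaces A's O(n) countdown loop by the closed form 2*m*(m+1)*(2*m+1)//3 with m = n//2 (faster: asymptotic).


-- ===== PORT A =====
-- the while loop of A: state (n, suma)
def pvLoopA (n suma : Int) : Int :=
  if _h : n > 1 then
    if PySem.Int.mod n 2 == 0 then pvLoopA (n - 1) (suma + n ^ 2)
    else pvLoopA (n - 1) suma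
  else suma
termination_by n.toNat
decreasing_by all_goals omega

def suma_cuadrados_pares_menores_igual (n : Int) : Int := pvLoopA n 0

-- ===== PORT B =====
def suma_cuadrados_pares_menores_igual_alt (n : Int) : Int :=
  let m : Int := if n ≥ 2 then PySem.Int.floordiv n 2 else 0
  PySem.Int.floordiv (2 * m * (m + 1) * (2 * m + 1)) 3

-- ===== PRECONDITION & SPEC =====
def Spec_suma_cuadrados_pares_menores_igual (n : Int) (out : Int) : Prop := out = suma_cuadrados_pares_menores_igual_alt n
instance (n : Int) (out : Int) : Decidable (Spec_suma_cuadrados_pares_menores_igual n out) := by unfold Spec_suma_cuadrados_pares_menores_igual; infer_instance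

-- ===== CLAIM (what is proved, stated in full; the proofs are below) =====
def Claim_equal_suma_cuadrados_pares_menores_igual : Prop := ∀ (n : Int), Dom_suma_cuadrados_pares_menores_igual n → Spec_suma_cuadrados_pares_menores_igual n (suma_cuadrados_pares_menores_igual n)

-- ===== LEMMAS AND PROOFS =====

-- exact division by 3, phrased for floordiv
theorem pv_fd3 (a b : Int) (h : a = 3 * b) : PySem.Int.floordiv a 3 = b := by
  rw [(PySem.Int.floordiv_eq_iff_of_pos (a := a) (b := 3) (q := b) (by norm_num))]
  omega

-- 3 divides m*(m+1)*(2m+1)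
theorem pv_three_dvd (m : Int) : ∃ k : Int, m * (m + 1) * (2 * m + 1) = 3 * k := by
  obtain ⟨q, r, hr, hm⟩ : ∃ q r : Int, (r = 0 ∨ r = 1 ∨ r = 2) ∧ m = 3 * q + r :=
    ⟨m / 3, m % 3, by omega, by omega⟩
  rcases hr with h | h | h <;> subst h <;> subst hm
  · exact ⟨q * (3 * q + 1) * (6 * q + 1), by ring⟩
  · exact ⟨(3 * q + 1) * (3 * q + 2) * (2 * q + 1), by ring⟩
  · exact ⟨(3 * q + 2) * (q + 1) * (6 * q + 5), by ring⟩

-- closed form as a function of m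
def pvF (m : Int) : Int := PySem.Int.floordiv (2 * m * (m + 1) * (2 * m + 1)) 3

theorem pvF_val (m : Int) (k : Int) (h : m * (m + 1) * (2 * m + 1) = 3 * k) :
    pvF m = 2 * k := by
  unfold pvF
  apply pv_fd3
  linarith [h]

theorem pvF_step (m : Int) : pvF m = (2 * m) ^ 2 + pvF (m - 1) := by
  obtain ⟨k, hk⟩ := pv_three_dvd m
  obtain ⟨k', hk'⟩ := pv_three_dvd (m - 1)
  rw [pvF_val m k hk]
  have h2 : (m - 1) * ((m - 1) + 1) * (2 * (m - 1) + 1) = 3 * k' := by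
    have := pv_three_dvd (m - 1); linarith [hk']
  rw [show pvF (m - 1) = 2 * k' from pvF_val (m - 1) k' (by linarith [hk'])]
  nlinarith [hk, hk']

theorem pv_alt_eq_F (n : Int) :
    suma_cuadrados_pares_menores_igual_alt n
      = pvF (if n ≥ 2 then PySem.Int.floordiv n 2 else 0) := rfl

theorem pv_fd2 (n m : Int) (h : 2 * m ≤ n) (h2 : n < 2 * m + 2) :
    PySem.Int.floordiv n 2 = m := by
  rw [(PySem.Int.floordiv_eq_iff_of_pos (a := n) (b := 2) (q := m) (by norm_num))]
  omega

-- main invariant: the loop adds the closed form to the accumulator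
theorem pvLoopA_eq (n suma : Int) :
    pvLoopA n suma = suma + suma_cuadrados_pares_menores_igual_alt n := by
  induction n, suma using pvLoopA.induct with
  | case1 n suma h he ih =>
    rw [pvLoopA]
    simp only [dif_pos h, if_pos he]
    rw [ih]
    -- n is even and ≥ 2
    have hev : n % 2 = 0 := by
      have : PySem.Int.mod n 2 = n % 2 := PySem.Int.mod_eq_emod_of_pos (a := n) (b := 2) (by norm_num)
      simpa [this] using he
    set m := n / 2 with hm
    have hn2 : n = 2 * m := by omega
    rw [pv_alt_eq_F, pv_alt_eq_F]
    rw [if_pos (show n ≥ 2 by omega)]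
    rw [pv_fd2 n m (by omega) (by omega)]
    by_cases h3 : n - 1 ≥ 2
    · rw [if_pos h3, pv_fd2 (n - 1) (m - 1) (by omega) (by omega)]
      have hstep := pvF_step m
      have hnsq : n ^ 2 = (2 * m) ^ 2 := by rw [hn2]
      linarith [hstep, hnsq]
    · -- n = 2, m = 1
      rw [if_neg h3]
      have hm1 : m = 1 := by omega
      have := pvF_step m
      rw [hm1] at this ⊢
      simp only [show (1:Int) - 1 = 0 from rfl] at this
      have hn : n = 2 := by omega
      rw [hn]; linarith [this]
  | case2 n suma h he ih =>
    rw [pvLoopA]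
    simp only [dif_pos h, if_neg he]
    rw [ih]
    -- n is odd and ≥ 2, hence ≥ 3
    have hev : n % 2 = 1 := by
      have hmm : PySem.Int.mod n 2 = n % 2 := PySem.Int.mod_eq_emod_of_pos (a := n) (b := 2) (by norm_num)
      have : ¬ PySem.Int.mod n 2 = 0 := by simpa using he
      omega
    have hn3 : n ≥ 3 := by omega
    set m := n / 2 with hm
    have hn2 : n = 2 * m + 1 := by omega
    rw [pv_alt_eq_F, pv_alt_eq_F]
    rw [if_pos (show n ≥ 2 by omega), if_pos (show n - 1 ≥ 2 by omega)]
    rw [pv_fd2 n m (by omega) (by omega), pv_fd2 (n - 1) m (by omega) (by omega)]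
  | case3 n suma h =>
    rw [pvLoopA]
    simp only [dif_neg h]
    rw [pv_alt_eq_F, if_neg (by omega : ¬ n ≥ 2)]
    have : pvF 0 = 0 := by unfold pvF; decide
    rw [this]; ring

-- ===== VERDICT (by name: the statement is the Claim_ definition above) =====
theorem suma_cuadrados_pares_menores_igual_spec : Claim_equal_suma_cuadrados_pares_menores_igual := by
  intro n _
  unfold Spec_suma_cuadrados_pares_menores_igual suma_cuadrados_pares_menores_igual
  rw [pvLoopA_eq]
  ring
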